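-- pv_equiv track=rewrite | github.com/AlbertMargaryan/Python_CPS109_Problems_Solution | main.py | duplicate_digit_bonus
-- ===== SOURCE A (Python) =====
-- def duplicate_digit_bonus(n):
--     def split_number_to_strings(number):
--         number_str = str(number)
--         result = [number_str[0]]
--
--         for digit in number_str[1:]:
--             if digit == result[-1][0]:
--                 result[-1] += digit
--             else:
--                 result.append(digit)
--
--         return result
--     splitN = split_number_to_strings(n)
--     lenSplit = len(splitN)
--     sum = 0
--     for j,i in enumerate(splitN):
--         if len(i)>=2:
--             if j+1==lenSplit:
--                 sum += 10**(len(i)-2)*2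
--             else:
--                 sum += 10 ** (len(i) - 2)
--     return sum
-- ===== SOURCE B (Python) =====
-- def duplicate_digit_bonus(n):
--     s = str(n)
--     cuts = [0] + [i + 1 for i, (a, b) in enumerate(zip(s, s[1:])) if a != b] + [len(s)]
--     lengths = [b - a for a, b in zip(cuts, cuts[1:])]
--     total = sum(10 ** (L - 2) for L in lengths if L >= 2)
--     return total + (10 ** (lengths[-1] - 2) if lengths[-1] >= 2 else 0)
-- ===== Notes on version B (the rewrite author's own statement) =====
-- stated objective: alternative
-- what changed: B never tracks runs or a counter: it collects the boundary cut positions of str(n) via enumerate(zip(s, s[1:])), takes adjacent differences of the cut list to get the run lengths, sums the power-of-ten bonus over all qualifying lengths, and adds the final length's bonus once more, versus A's run-string list building plus enumerate scan with a last-index test.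
import Mathlib
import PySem

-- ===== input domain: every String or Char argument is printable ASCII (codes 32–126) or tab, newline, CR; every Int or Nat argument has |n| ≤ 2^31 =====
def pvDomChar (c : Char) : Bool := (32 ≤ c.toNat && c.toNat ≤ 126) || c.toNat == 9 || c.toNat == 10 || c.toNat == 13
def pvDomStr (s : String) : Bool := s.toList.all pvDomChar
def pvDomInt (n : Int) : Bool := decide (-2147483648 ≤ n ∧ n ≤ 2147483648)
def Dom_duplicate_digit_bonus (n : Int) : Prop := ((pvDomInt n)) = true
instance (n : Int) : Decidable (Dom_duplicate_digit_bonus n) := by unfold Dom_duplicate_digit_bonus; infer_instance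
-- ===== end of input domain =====

-- B replaces A's run-string building + enumerate scan by staged list passes over boundary
-- positions (cut indices, adjacent differences, then one sum plus a last-run correction);
-- return values proved equal on all Int inputs.

-- ===== PORT A =====
-- Python strings ported as List Char; str(number) = PySem.Int.toStr.
-- split_number_to_strings' loop: result[-1][0] is (getLast?.getD []).head?.
def pvSplitA : List Char → List (List Char) → List (List Char)
  | [], result => result
  | d :: rest, result =>
    if (result.getLast?.getD []).head? = some d then
      pvSplitA rest (result.dropLast ++ [(result.getLast?.getD []) ++ [d]])
    else
      pvSplitA rest (result ++ [[d]])

-- the 'for j,i in enumerate(splitN)' summation loop, j the running index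
def pvSumALoop (lenSplit : Nat) : List (List Char) → Nat → Int → Int
  | [], _, sum => sum
  | i :: rest, j, sum =>
    pvSumALoop lenSplit rest (j + 1)
      (if 2 ≤ i.length then
        (if j + 1 = lenSplit then sum + 10 ^ (i.length - 2) * 2
         else sum + 10 ^ (i.length - 2))
       else sum)

def duplicate_digit_bonus (n : Int) : Int :=
  match (PySem.Int.toStr n).toList with
  | [] => 0   -- unreachable: str(n) is never empty (Python would raise IndexError here)
  | c0 :: rest =>
    let splitN := pvSplitA rest [[c0]]
    pvSumALoop splitN.length splitN 0 0

-- ===== PORT B =====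
-- Source B line by line: cuts = [0] + [i+1 for i,(a,b) in enumerate(zip(s, s[1:])) if a != b] + [len(s)];
-- lengths = [b-a for a,b in zip(cuts, cuts[1:])]; total = sum(10**(L-2) for L in lengths if L >= 2);
-- return total + (10**(lengths[-1]-2) if lengths[-1] >= 2 else 0).
def duplicate_digit_bonus_alt (n : Int) : Int :=
  let s := (PySem.Int.toStr n).toList
  let cuts : List Int :=
    0 :: ((PySem.List.enumerate (s.zip (PySem.List.slice s (some 1) none)) 0).filter
            (fun x => x.2.1 != x.2.2)).map (fun x => x.1 + 1) ++ [(s.length : Int)]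
  let lengths : List Int :=
    (cuts.zip (PySem.List.slice cuts (some 1) none)).map (fun p => p.2 - p.1)
  let total : Int :=
    ((lengths.filter (fun L => 2 ≤ L)).map (fun L => (10 : Int) ^ (L - 2).toNat)).sum
  -- lengths[-1]: lengths is always nonempty (cuts has ≥ 2 entries), so it is the last element;
  -- the exponent L-2 is ≥ 0 under the guard, so (L-2).toNat is exact.
  total + (if 2 ≤ lengths.getLast?.getD 0 then (10 : Int) ^ ((lengths.getLast?.getD 0) - 2).toNat else 0)

-- ===== PRECONDITION & SPEC =====
def Spec_duplicate_digit_bonus (n : Int) (out : Int) : Prop := out = duplicate_digit_bonus_alt n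
instance (n : Int) (out : Int) : Decidable (Spec_duplicate_digit_bonus n out) := by unfold Spec_duplicate_digit_bonus; infer_instance

-- ===== CLAIM (what is proved, stated in full; the proofs are below) =====
def Claim_equal_duplicate_digit_bonus : Prop := ∀ (n : Int), Dom_duplicate_digit_bonus n → Spec_duplicate_digit_bonus n (duplicate_digit_bonus n)

-- ===== LEMMAS AND PROOFS =====

-- bonus of a closed (non-final) run of length l
def pvBonus (l : Nat) : Int := if 2 ≤ l then 10 ^ (l - 2) else 0

-- total bonus of a list of run lengths
def pvClosedN (ls : List Nat) : Int := (ls.map pvBonus).sum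

-- reference run-length list of c :: cs with the current run already of length k
def pvRuns : List Char → Char → Nat → List Nat
  | [], _, k => [k]
  | d :: cs, c, k => if d = c then pvRuns cs c (k + 1) else k :: pvRuns cs d 1

-- cut positions: partial sums of the run lengths starting from a
def pvCutsFrom : Int → List Nat → List Int
  | _, [] => []
  | a, l :: ls => (a + l) :: pvCutsFrom (a + l) ls

theorem pvRuns_ne_nil : ∀ (cs : List Char) (c : Char) (k : Nat), pvRuns cs c k ≠ [] := by
  intro cs
  induction cs with
  | nil => intro c k; simp [pvRuns]
  | cons d rest ih =>
      intro c k
      by_cases h : d = c <;> simp [pvRuns, h, ih]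

-- A's enumerate loop on xs ++ [y]: every element of xs is non-final, y is final (doubled)
theorem sumALoop_spec (y : List Char) :
    ∀ (xs : List (List Char)) (j : Nat) (s : Int),
    pvSumALoop (j + xs.length + 1) (xs ++ [y]) j s
      = s + pvClosedN (xs.map List.length) + (if 2 ≤ y.length then 10 ^ (y.length - 2) * 2 else 0) := by
  intro xs
  induction xs with
  | nil =>
      intro j s
      have ht : j + 1 = j + ([] : List (List Char)).length + 1 := by simp
      simp only [List.nil_append, pvSumALoop, if_pos ht, pvClosedN, List.map_nil, List.sum_nil]
      split <;> ring
  | cons x xs ih =>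
      intro j s
      have hne : ¬ (j + 1 = j + (x :: xs).length + 1) := by simp
      have harr : j + (x :: xs).length + 1 = (j + 1) + xs.length + 1 := by
        simp; omega
      simp only [List.cons_append, pvSumALoop]
      rw [if_neg hne, harr]
      have hstep : (if 2 ≤ x.length then s + 10 ^ (x.length - 2) else s)
          = s + pvBonus x.length := by
        unfold pvBonus; split <;> ring
      rw [hstep, ih]
      simp only [pvClosedN, List.map_cons, List.sum_cons]
      ring

-- A's grouping produces exactly the reference run lengths
theorem split_lengths :
    ∀ (cs : List Char) (acc : List (List Char)) (c : Char) (k : Nat), 1 ≤ k →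
    (pvSplitA cs (acc ++ [List.replicate k c])).map List.length
      = acc.map List.length ++ pvRuns cs c k := by
  intro cs
  induction cs with
  | nil =>
      intro acc c k _
      simp [pvSplitA, pvRuns]
  | cons d rest ih =>
      intro acc c k hk
      have hlast : ((acc ++ [List.replicate k c]).getLast?.getD []) = List.replicate k c := by
        simp
      have hhead : (List.replicate k c).head? = some c := by
        cases k with
        | zero => omega
        | succ m => simp [List.replicate_succ]
      by_cases hd : d = c
      · subst hd
        simp only [pvSplitA, hlast, hhead, List.dropLast_concat, reduceIte]
        have hrep : List.replicate k d ++ [d] = List.replicate (k + 1) d := by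
          simp [List.replicate_succ']
        rw [hrep, ih acc d (k + 1) (by omega)]
        simp [pvRuns]
      · have hcond : ¬ (((acc ++ [List.replicate k c]).getLast?.getD []).head? = some d) := by
          rw [hlast, hhead]
          simp
          intro h; exact hd h.symm
        simp only [pvSplitA]
        rw [if_neg hcond]
        have hone : ([d] : List Char) = List.replicate 1 d := by simp
        rw [hone, ih (acc ++ [List.replicate k c]) d 1 (by omega)]
        simp [pvRuns, hd]

-- B's boundary comprehension (with the closing cut appended) = partial sums of the run lengths
theorem cuts_eq :
    ∀ (cs : List Char) (c : Char) (j : Int) (k : Nat),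
    ((PySem.List.enumerate ((c :: cs).zip cs) j).filter (fun x => x.2.1 != x.2.2)).map
        (fun x => x.1 + 1) ++ [j + cs.length + 1]
      = pvCutsFrom (j + 1 - k) (pvRuns cs c k) := by
  intro cs
  induction cs with
  | nil =>
      intro c j k
      simp only [List.zip_nil_right, PySem.List.enumerate_nil, List.filter_nil, List.map_nil,
        List.nil_append, pvRuns, pvCutsFrom, List.length_nil]
      congr 1
      push_cast
      ring
  | cons d rest ih =>
      intro c j k
      rw [List.zip_cons_cons, PySem.List.enumerate_cons]
      by_cases hd : d = c
      · subst hd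
        rw [List.filter_cons_of_neg (by simp)]
        simp only [pvRuns, reduceIte]
        have := ih d (j + 1) (k + 1)
        have harg : (j + 1) + 1 - (↑(k + 1) : Int) = j + 1 - k := by push_cast; ring
        rw [harg] at this
        rw [← this]
        simp only [List.length_cons]
        congr 2
        push_cast
        ring
      · have hne : ¬ c = d := fun h => hd h.symm
        rw [List.filter_cons_of_pos (by simp [hne])]
        simp only [List.map_cons, List.cons_append, pvRuns, hd, reduceIte, pvCutsFrom]
        have h1 : j + 1 - (k : Int) + k = j + 1 := by ring
        rw [h1]
        have := ih d (j + 1) 1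
        have harg : (j + 1) + 1 - ((1 : Nat) : Int) = j + 1 := by push_cast; ring
        rw [harg] at this
        rw [← this]
        simp only [List.length_cons]
        congr 3
        push_cast
        ring

-- adjacent differences of the cut list recover the run lengths (as Ints)
theorem zipdiff :
    ∀ (ls : List Nat) (a : Int),
    (((a :: pvCutsFrom a ls).zip (pvCutsFrom a ls)).map (fun p => p.2 - p.1))
      = ls.map (fun x : Nat => (x : Int)) := by
  intro ls
  induction ls with
  | nil => intro a; simp [pvCutsFrom]
  | cons l ls ih =>
      intro a
      simp only [pvCutsFrom, List.zip_cons_cons, List.map_cons, ih (a + l)]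
      congr 1
      ring

-- the filtered sum over Int run lengths is the closed-run bonus sum
theorem bonussum :
    ∀ (ls : List Nat),
    (((ls.map (fun x : Nat => (x : Int))).filter (fun L => decide (2 ≤ L))).map
        (fun L => (10 : Int) ^ (L - 2).toNat)).sum = pvClosedN ls := by
  intro ls
  induction ls with
  | nil => simp [pvClosedN]
  | cons l ls ih =>
      simp only [List.map_cons, List.filter_cons]
      by_cases h : 2 ≤ l
      · have h2' : (2 : Int) ≤ (l : Int) := by exact_mod_cast h
        have he : (((l : Int)) - 2).toNat = l - 2 := by omega
        rw [if_pos (by simpa using h2')]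
        simp only [List.map_cons, List.sum_cons, ih, he]
        simp [pvClosedN, pvBonus, if_pos h]
      · have h2' : ¬ ((2 : Int) ≤ (l : Int)) := by exact_mod_cast h
        rw [if_neg (by simpa using h2')]
        simp only [ih]
        simp [pvClosedN, pvBonus, if_neg h]

-- ===== VERDICT (by name: the statement is the Claim_ definition above) =====
theorem duplicate_digit_bonus_spec : Claim_equal_duplicate_digit_bonus := by
  intro n _
  unfold Spec_duplicate_digit_bonus duplicate_digit_bonus duplicate_digit_bonus_alt
  cases h : (PySem.Int.toStr n).toList with
  | nil => rfl
  | cons c0 cs =>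
      dsimp only
      -- the run-length list and its concat decomposition
      obtain ⟨init, l, hls⟩ : ∃ init l, pvRuns cs c0 1 = init ++ [l] := by
        rcases List.eq_nil_or_concat (pvRuns cs c0 1) with h' | h'
        · exact absurd h' (pvRuns_ne_nil cs c0 1)
        · simpa [List.concat_eq_append] using h'
      -- A side
      have hsplit : (pvSplitA cs [[c0]]).map List.length = init ++ [l] := by
        have h1 : ([[c0]] : List (List Char)) = [] ++ [List.replicate 1 c0] := by simp
        rw [h1, split_lengths cs [] c0 1 (by omega)]
        simpa using hls
      obtain ⟨xs, y, hgs⟩ : ∃ xs y, pvSplitA cs [[c0]] = xs ++ [y] := by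
        rcases List.eq_nil_or_concat (pvSplitA cs [[c0]]) with h' | h'
        · rw [h'] at hsplit; exact absurd hsplit.symm (by simp)
        · simpa [List.concat_eq_append] using h'
      rw [hgs] at hsplit
      simp only [List.map_append, List.map_cons, List.map_nil] at hsplit
      have hinj := List.append_inj' hsplit rfl
      have hxs : xs.map List.length = init := hinj.1
      have hy : y.length = l := by simpa using hinj.2
      have hA : pvSumALoop (pvSplitA cs [[c0]]).length (pvSplitA cs [[c0]]) 0 0
          = pvClosedN init + (if 2 ≤ l then 10 ^ (l - 2) * 2 else 0) := by
        rw [hgs]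
        have hlen : (xs ++ [y]).length = 0 + xs.length + 1 := by simp
        rw [hlen, sumALoop_spec y xs 0 0, hxs, hy]
        ring_nf
      -- B side
      have hslice : PySem.List.slice (c0 :: cs) (some 1) none = cs := by
        rw [PySem.List.slice_from_one]
        rfl
      have hcuts : ((PySem.List.enumerate ((c0 :: cs).zip cs) 0).filter
            (fun x => x.2.1 != x.2.2)).map (fun x => x.1 + 1) ++ [((c0 :: cs).length : Int)]
          = pvCutsFrom 0 (pvRuns cs c0 1) := by
        have := cuts_eq cs c0 0 1
        have harg : (0 : Int) + 1 - ((1 : Nat) : Int) = 0 := by norm_num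
        rw [harg] at this
        rw [← this]
        congr 1
        simp
      have hcuts2 : (((0 : Int) :: ((PySem.List.enumerate ((c0 :: cs).zip cs) 0).filter
            (fun x => x.2.1 != x.2.2)).map (fun x => x.1 + 1)) ++ [((c0 :: cs).length : Int)])
          = 0 :: pvCutsFrom 0 (pvRuns cs c0 1) := by
        rw [List.cons_append, hcuts]
      have hslice2 : ∀ (t : List Int),
          PySem.List.slice ((0 : Int) :: t) (some 1) none = t := by
        intro t
        rw [PySem.List.slice_from_one]
        rfl
      simp only [hslice]
      rw [hcuts2, hslice2, hls]
      rw [zipdiff (init ++ [l]) 0]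
      have hlast : ((init ++ [l]).map (fun x : Nat => (x : Int))).getLast? = some (l : Int) := by
        simp
      rw [hlast]
      simp only [Option.getD_some]
      rw [bonussum (init ++ [l])]
      simp only [pvClosedN, List.map_append, List.sum_append, List.map_cons, List.map_nil,
        List.sum_cons, List.sum_nil]
      rw [hA]
      simp only [pvClosedN]
      by_cases h2 : 2 ≤ l
      · have h2' : (2 : Int) ≤ (l : Int) := by exact_mod_cast h2
        have he : (((l : Int)) - 2).toNat = l - 2 := by omega
        rw [if_pos h2, if_pos h2', he]
        simp only [pvBonus, if_pos h2]
        ring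
      · have h2' : ¬ ((2 : Int) ≤ (l : Int)) := by exact_mod_cast h2
        rw [if_neg h2, if_neg h2']
        simp only [pvBonus, if_neg h2]
        ring
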